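-- pv_equiv track=rewrite | github.com/LeaWron/mdd-paradigm | tests/test_gen.py | check_iat
-- ===== SOURCE A (Python) =====
-- from collections import defaultdict
--
-- def check_iat(
--     key_seq: list[str],
--     max_seq_same: int = 5,
--     mean: int = 1,
-- ):
--     pre = None
--     cnt = 0
--     counter = defaultdict(int)
--     for key in key_seq:
--         if pre == key:
--             cnt += 1
--             if cnt > max_seq_same:
--                 return False
--         else:
--             cnt = 1
--         counter[str(key)] += 1
--         pre = key
--     for key, cnt in counter.items():
--         if cnt != mean:
--             return False
--     return True
-- ===== SOURCE B (Python) =====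
-- def check_iat(
--     key_seq: list[str],
--     max_seq_same: int = 5,
--     mean: int = 1,
-- ):
--     # Declarative brute-force checks instead of a fused state machine:
--     # a run longer than max_seq_same is exactly a window of w identical keys
--     # (a run only trips once it has at least 2 keys, hence the max with 1).
--     w = max(max_seq_same, 1) + 1
--     for i in range(len(key_seq) - w + 1):
--         win = key_seq[i:i + w]
--         if all(x == win[0] for x in win):
--             return False
--     return all(key_seq.count(str(k)) == mean for k in key_seq)
-- ===== Notes on version B (the rewrite author's own statement) =====
-- stated objective: alternative
-- what changed: Replaces A's fused single-pass state machine (pre/cnt streak tracking plus an incrementally built counter dict) with two declarative brute-force checks: a sliding-window scan that looks for max(max_seq_same,1)+1 identical consecutive keys, and a per-element list.count uniformity test with no dictionary at all.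
import Mathlib
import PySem

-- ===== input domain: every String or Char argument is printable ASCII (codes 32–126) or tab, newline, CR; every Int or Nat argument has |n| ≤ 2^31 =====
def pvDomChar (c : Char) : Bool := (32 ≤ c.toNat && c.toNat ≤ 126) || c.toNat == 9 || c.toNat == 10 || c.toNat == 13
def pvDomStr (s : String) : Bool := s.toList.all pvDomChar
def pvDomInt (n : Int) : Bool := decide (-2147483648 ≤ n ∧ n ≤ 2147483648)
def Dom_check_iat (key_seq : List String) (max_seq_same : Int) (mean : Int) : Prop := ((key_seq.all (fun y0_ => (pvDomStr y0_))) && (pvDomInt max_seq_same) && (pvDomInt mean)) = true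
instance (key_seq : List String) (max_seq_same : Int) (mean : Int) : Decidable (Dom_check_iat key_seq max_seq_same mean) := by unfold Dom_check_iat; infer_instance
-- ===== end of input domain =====

-- B replaces A's fused pre/cnt/counter state machine by two declarative brute-force
-- checks (sliding window of identical keys, per-element list.count); objective: alternative.

-- ===== PORT A =====
-- second loop of A: for key, cnt in counter.items(): if cnt != mean: return False
def pvCheckCountsA (mean : Int) : List (String × Int) → Bool
  | [] => true
  | (_, c) :: rest => if c != mean then false else pvCheckCountsA mean rest

-- main loop of A (str(key) = key since keys are already strings;
-- counter[str(key)] += 1 on a defaultdict(int) is Dict.modify key 0 (· + 1))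
def pvLoopA (max_seq_same mean : Int) : List String → Option String → Int → PySem.Dict String Int → Bool
  | [], _, _, counter => pvCheckCountsA mean counter.items
  | key :: rest, pre, cnt, counter =>
    if pre == some key then
      if cnt + 1 > max_seq_same then false
      else pvLoopA max_seq_same mean rest (some key) (cnt + 1) (counter.modify key 0 (· + 1))
    else pvLoopA max_seq_same mean rest (some key) 1 (counter.modify key 0 (· + 1))

def check_iat (key_seq : List String) (max_seq_same : Int) (mean : Int) : Bool :=
  pvLoopA max_seq_same mean key_seq none 0 PySem.Dict.empty

-- ===== PORT B =====
-- all(x == win[0] for x in win); an empty window is vacuously all-equal (win[0] is never evaluated)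
def pvAllEq : List String → Bool
  | [] => true
  | h :: t => (h :: t).all (fun x => x == h)

def check_iat_alt (key_seq : List String) (max_seq_same : Int) (mean : Int) : Bool :=
  let w : Int := max max_seq_same 1 + 1
  -- for i in range(len(key_seq) - w + 1): if all-equal window: return False
  if (PySem.List.pyRange 0 ((key_seq.length : Int) - w + 1) 1).any
       (fun i => pvAllEq (PySem.List.slice key_seq (some i) (some (i + w))))
  then false
  -- str(k) = k on strings: all(key_seq.count(str(k)) == mean for k in key_seq)
  else key_seq.all (fun k => ((key_seq.count k : Int)) == mean)

-- ===== PRECONDITION & SPEC =====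
def Spec_check_iat (key_seq : List String) (max_seq_same : Int) (mean : Int) (out : Bool) : Prop := out = check_iat_alt key_seq max_seq_same mean
instance (key_seq : List String) (max_seq_same : Int) (mean : Int) (out : Bool) : Decidable (Spec_check_iat key_seq max_seq_same mean out) := by unfold Spec_check_iat; infer_instance

-- ===== CLAIM (what is proved, stated in full; the proofs are below) =====
def Claim_equal_check_iat : Prop := ∀ (key_seq : List String) (max_seq_same : Int) (mean : Int), Dom_check_iat key_seq max_seq_same mean → Spec_check_iat key_seq max_seq_same mean (check_iat key_seq max_seq_same mean)

-- ===== LEMMAS AND PROOFS =====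

-- ---- helper notions used only by the proof ----

-- the adjacent-equality bit list of key_seq
def pvPairs (xs : List String) : List Bool :=
  (xs.zip (xs.drop 1)).map (fun p => p.1 == p.2)

-- length of the leading run of `true`s
def pvLead : List Bool → Nat
  | true :: r => pvLead r + 1
  | _ => 0

-- "somewhere in bs there are K consecutive trues"
def pvHW (K : Nat) (bs : List Bool) : Prop :=
  ∃ i, (bs.drop i).take K = List.replicate K true

-- A's streak loop abstracted to the bit list
def pvStreakB (M : Int) : List Bool → Int → Bool
  | [], _ => true
  | b :: rest, s =>
    if b then
      if s + 1 ≥ M then false else pvStreakB M rest (s + 1)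
    else pvStreakB M rest 0

-- ---- counts side ----

lemma pvCheckCountsA_eq_all (mean : Int) : ∀ (l : List (String × Int)),
    pvCheckCountsA mean l = l.all (fun p => p.2 == mean) := by
  intro l
  induction l with
  | nil => rfl
  | cons p rest ih =>
    obtain ⟨k, c⟩ := p
    simp [pvCheckCountsA, ih, List.all_cons]
    by_cases h : c = mean <;> simp [h]

lemma pv_counts (xs : List String) (m : Int) :
    pvCheckCountsA m (PySem.Dict.counter xs).items
      = xs.all (fun k => ((xs.count k : Int)) == m) := by
  rw [pvCheckCountsA_eq_all, PySem.Dict.items_counter, List.all_map]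
  rw [Bool.eq_iff_iff]
  simp only [List.all_eq_true, Function.comp]
  constructor
  · intro h k hk
    exact h k ((PySem.Set.mem_ofList _ _).2 hk)
  · intro h k hk
    exact h k ((PySem.Set.mem_ofList _ _).1 hk)

-- ---- runs side ----

-- the streak loop over pairs (A\'s run logic, extracted by pv_main below)
def pvStreakLoop (max_seq_same : Int) : List (String × String) → Int → Bool
  | [], _ => true
  | (a, b) :: rest, streak =>
    if a == b then
      if streak + 1 ≥ max_seq_same then false
      else pvStreakLoop max_seq_same rest (streak + 1)
    else pvStreakLoop max_seq_same rest 0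

-- pvStreakLoop only looks at equality of the pair components
lemma pv_streak_eq_streakB (M : Int) : ∀ (ps : List (String × String)) (s : Int),
    pvStreakLoop M ps s = pvStreakB M (ps.map (fun p => p.1 == p.2)) s := by
  intro ps
  induction ps with
  | nil => intro s; rfl
  | cons p rest ih =>
    intro s
    obtain ⟨a, b⟩ := p
    by_cases h : a = b <;> simp [pvStreakLoop, pvStreakB, h, ih]

lemma pv_lead_take : ∀ (K : Nat) (l : List Bool),
    l.take K = List.replicate K true ↔ K ≤ pvLead l := by
  intro K
  induction K with
  | zero => intro l; simp
  | succ K ih =>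
    intro l
    cases l with
    | nil => simp [pvLead, List.replicate_succ]
    | cons b r =>
      cases b with
      | true => simp [pvLead, List.replicate_succ, ih r]
      | false => simp [pvLead, List.replicate_succ]

lemma pv_streakB_char (M : Int) : ∀ (bs : List Bool) (s : Int), 0 ≤ s →
    (pvStreakB M bs s = false ↔
      ((1 ≤ pvLead bs ∧ M ≤ s + pvLead bs) ∨ pvHW (max M 1).toNat bs)) := by
  intro bs
  induction bs with
  | nil =>
    intro s hs
    constructor
    · intro h; simp [pvStreakB] at h
    · rintro (⟨h1, _⟩ | ⟨i, hi⟩)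
      · simp [pvLead] at h1
      · obtain ⟨K', hK'⟩ : ∃ K', (max M 1).toNat = K' + 1 := ⟨(max M 1).toNat - 1, by omega⟩
        rw [hK', List.replicate_succ] at hi
        simp at hi
  | cons b rest ih =>
    intro s hs
    cases b with
    | false =>
      have hstep : pvStreakB M (false :: rest) s = pvStreakB M rest 0 := by
        simp [pvStreakB]
      have hlead : pvLead (false :: rest) = 0 := rfl
      rw [hstep, ih 0 (by omega)]
      constructor
      · rintro (⟨h1, h2⟩ | ⟨i, hi⟩)
        · right
          refine ⟨1, ?_⟩
          simp only [List.drop_succ_cons, List.drop_zero]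
          rw [pv_lead_take]
          omega
        · right; exact ⟨i + 1, by simpa using hi⟩
      · rintro (⟨h1, _⟩ | ⟨i, hi⟩)
        · rw [hlead] at h1; omega
        · cases i with
          | zero =>
            simp only [List.drop_zero] at hi
            obtain ⟨K', hK'⟩ : ∃ K', (max M 1).toNat = K' + 1 := ⟨(max M 1).toNat - 1, by omega⟩
            rw [hK', List.replicate_succ] at hi
            simp at hi
          | succ i =>
            right
            exact ⟨i, by simpa using hi⟩
    | true =>
      have hlead : pvLead (true :: rest) = pvLead rest + 1 := rfl
      by_cases hM : s + 1 ≥ M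
      · have hstep : pvStreakB M (true :: rest) s = false := by
          simp [pvStreakB, hM]
        rw [hstep]
        constructor
        · intro _
          left
          omega
        · intro _
          rfl
      · have hstep : pvStreakB M (true :: rest) s = pvStreakB M rest (s + 1) := by
          simp [pvStreakB, hM]
        rw [hstep, ih (s + 1) (by omega)]
        have hM2 : 2 ≤ M := by omega
        have hKeq : (max M 1).toNat = M.toNat := by omega
        constructor
        · rintro (⟨h1, h2⟩ | ⟨i, hi⟩)
          · left
            omega
          · right; exact ⟨i + 1, by simpa using hi⟩
        · rintro (⟨h1, h2⟩ | ⟨i, hi⟩)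
          · left
            omega
          · cases i with
            | zero =>
              simp only [List.drop_zero] at hi
              obtain ⟨K', hK'⟩ : ∃ K', (max M 1).toNat = K' + 1 := ⟨(max M 1).toNat - 1, by omega⟩
              rw [hK', List.replicate_succ] at hi
              simp only [List.take_succ_cons, List.cons.injEq] at hi
              have hlr : K' ≤ pvLead rest := (pv_lead_take K' rest).1 hi.2
              left
              omega
            | succ i =>
              right
              exact ⟨i, by simpa using hi⟩

lemma pv_alleq_all (a : String) (t : List String) :
    pvAllEq (a :: t) = (a :: t).all (fun x => x == a) := rfl

lemma pv_alleq_pairs : ∀ (K : Nat) (l : List String), K + 1 ≤ l.length →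
    (pvAllEq (l.take (K + 1)) = true ↔ (pvPairs l).take K = List.replicate K true) := by
  intro K
  induction K with
  | zero =>
    intro l hl
    cases l with
    | nil => simp at hl
    | cons a t => simp [pvAllEq, pvPairs]
  | succ K ih =>
    intro l hl
    cases l with
    | nil => simp at hl
    | cons a t =>
      cases t with
      | nil => simp at hl
      | cons b t' =>
        have hlen : K + 1 ≤ (b :: t').length := by simpa using hl
        have hpairs : pvPairs (a :: b :: t') = (a == b) :: pvPairs (b :: t') := by
          simp [pvPairs]
        have htake : (a :: b :: t').take (K + 1 + 1) = a :: (b :: t').take (K + 1) := by simp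
        rw [hpairs, htake]
        simp only [List.take_succ_cons, List.replicate_succ]
        rw [List.cons_eq_cons]
        by_cases hab : a = b
        · subst hab
          have htail := ih (a :: t') hlen
          simp only [List.take_succ_cons] at htail
          constructor
          · intro h
            refine ⟨by simp, htail.1 ?_⟩
            rw [pv_alleq_all] at h ⊢
            simpa using h
          · rintro ⟨-, h2⟩
            have h3 := htail.2 h2
            rw [pv_alleq_all] at h3 ⊢
            simpa using h3
        · constructor
          · intro h
            exfalso
            apply hab
            rw [pv_alleq_all] at h
            simp only [List.all_cons, Bool.and_eq_true, beq_iff_eq] at h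
            exact h.2.1.symm
          · rintro ⟨h1, -⟩
            exfalso
            exact hab (by simpa using h1)

lemma pv_pairs_tail : ∀ (xs : List String), (pvPairs xs).drop 1 = pvPairs (xs.drop 1)
  | [] => rfl
  | [_] => rfl
  | _ :: _ :: _ => by simp [pvPairs]

lemma pv_pairs_drop (xs : List String) : ∀ (j : Nat),
    (pvPairs xs).drop j = pvPairs (xs.drop j) := by
  intro j
  induction j generalizing xs with
  | zero => simp
  | succ j ih =>
    have h1 : (pvPairs xs).drop (j + 1) = ((pvPairs xs).drop 1).drop j := by
      rw [List.drop_drop]; ring_nf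
    rw [h1, pv_pairs_tail, ih]
    rw [List.drop_drop]
    ring_nf

lemma pv_pairs_length (xs : List String) :
    (pvPairs xs).length = xs.length - 1 := by
  simp [pvPairs]

-- B's window scan finds a window ↔ the pair list has K consecutive trues
lemma pv_win_iff (xs : List String) (M : Int) :
    ((PySem.List.pyRange 0 ((xs.length : Int) - (max M 1 + 1) + 1) 1).any
       (fun i => pvAllEq (PySem.List.slice xs (some i) (some (i + (max M 1 + 1))))) = true)
      ↔ pvHW (max M 1).toNat (pvPairs xs) := by
  set K : Nat := (max M 1).toNat with hK
  have hKI : ((K : Int)) = max M 1 := by omega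
  have hKpos : 1 ≤ K := by omega
  constructor
  · intro h
    rw [List.any_eq_true] at h
    obtain ⟨i, hi, hwin⟩ := h
    rw [PySem.List.mem_pyRange_one] at hi
    obtain ⟨hi0, hilt⟩ := hi
    have hj : i = ((i.toNat : Nat) : Int) := by omega
    set j : Nat := i.toNat with hjdef
    have hslice : PySem.List.slice xs (some i) (some (i + (max M 1 + 1)))
        = (xs.drop j).take (K + 1) := by
      rw [hj]
      have : i + (max M 1 + 1) = ((j : Int)) + (((K + 1 : Nat) : Int)) := by push_cast; omega
      rw [hj] at this
      rw [this, PySem.List.slice_natCast_add]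
    rw [hslice] at hwin
    have hlen : K + 1 ≤ (xs.drop j).length := by
      simp only [List.length_drop]
      omega
    refine ⟨j, ?_⟩
    rw [pv_pairs_drop]
    exact (pv_alleq_pairs K (xs.drop j) hlen).1 hwin
  · rintro ⟨j, hj⟩
    rw [List.any_eq_true]
    have hlenrep : ((pvPairs xs).drop j).take K = List.replicate K true := hj
    have hlb : j + K ≤ (pvPairs xs).length := by
      have h1 : (((pvPairs xs).drop j).take K).length = K := by rw [hlenrep]; simp
      simp only [List.length_take, List.length_drop] at h1
      omega
    rw [pv_pairs_length] at hlb
    refine ⟨(j : Int), ?_, ?_⟩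
    · rw [PySem.List.mem_pyRange_one]
      constructor
      · omega
      · omega
    · have hslice : PySem.List.slice xs (some (j : Int)) (some ((j : Int) + (max M 1 + 1)))
          = (xs.drop j).take (K + 1) := by
        have : (j : Int) + (max M 1 + 1) = ((j : Int)) + (((K + 1 : Nat) : Int)) := by push_cast; omega
        rw [this, PySem.List.slice_natCast_add]
      rw [hslice]
      have hlen : K + 1 ≤ (xs.drop j).length := by
        simp only [List.length_drop]
        omega
      apply (pv_alleq_pairs K (xs.drop j) hlen).2
      rw [← pv_pairs_drop]
      exact hj

-- the fused loop of A, from a mid-run state, equals the streak scan of the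
-- remaining adjacent pairs (streak = cnt - 1) and the count check on the final counter
lemma pv_main (M m : Int) : ∀ (rest : List String) (p : String) (cnt : Int) (d : PySem.Dict String Int),
    pvLoopA M m rest (some p) cnt d =
      (pvStreakLoop M (List.zip (p :: rest) rest) (cnt - 1) &&
        pvCheckCountsA m ((rest.foldl (fun d x => d.modify x 0 (· + 1)) d).items)) := by
  intro rest
  induction rest with
  | nil => intro p cnt d; simp [pvLoopA, pvStreakLoop]
  | cons x rest ih =>
    intro p cnt d
    rw [List.zip_cons_cons]
    by_cases h : p = x
    · subst h
      by_cases hM : cnt + 1 > M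
      · have hM' : M ≤ cnt := by omega
        simp [pvLoopA, pvStreakLoop, hM, hM']
      · have hM' : ¬ M ≤ cnt := by omega
        simp [pvLoopA, pvStreakLoop, hM, hM', ih]
    · simp [pvLoopA, pvStreakLoop, h, ih]

-- the streak scan of the pairs of xs is exactly the negation of B's window scan
lemma pv_streak_iff_win (xs : List String) (M : Int) :
    pvStreakLoop M (xs.zip (xs.drop 1)) 0 =
      !((PySem.List.pyRange 0 ((xs.length : Int) - (max M 1 + 1) + 1) 1).any
          (fun i => pvAllEq (PySem.List.slice xs (some i) (some (i + (max M 1 + 1)))))) := by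
  have hchar := pv_streakB_char M (pvPairs xs) 0 (by omega)
  have hfalse : pvStreakLoop M (xs.zip (xs.drop 1)) 0 = false ↔ pvHW (max M 1).toNat (pvPairs xs) := by
    rw [pv_streak_eq_streakB]
    have : (xs.zip (xs.drop 1)).map (fun p => p.1 == p.2) = pvPairs xs := rfl
    rw [this, hchar]
    constructor
    · rintro (⟨h1, h2⟩ | h)
      · refine ⟨0, ?_⟩
        simp only [List.drop_zero]
        rw [pv_lead_take]
        omega
      · exact h
    · intro h; right; exact h
  rw [← pv_win_iff] at hfalse
  cases hA : (PySem.List.pyRange 0 ((xs.length : Int) - (max M 1 + 1) + 1) 1).any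
      (fun i => pvAllEq (PySem.List.slice xs (some i) (some (i + (max M 1 + 1))))) with
  | true => simpa using hfalse.2 hA
  | false =>
    simp only [Bool.not_false]
    cases hS : pvStreakLoop M (xs.zip (xs.drop 1)) 0 with
    | true => rfl
    | false => rw [hfalse.1 hS] at hA; simp at hA
  
lemma pv_toplevel (ks : List String) (M m : Int) :
    check_iat ks M m = check_iat_alt ks M m := by
  cases ks with
  | nil =>
    simp [check_iat, check_iat_alt, pvLoopA, pvCheckCountsA, PySem.Dict.empty]
  | cons k rest =>
    have h0 : check_iat (k :: rest) M m
        = pvLoopA M m rest (some k) 1 ((PySem.Dict.empty).modify k 0 (· + 1)) := by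
      simp [check_iat, pvLoopA]
    rw [h0, pv_main]
    have hc : (PySem.Dict.counter (k :: rest) : PySem.Dict String Int)
        = rest.foldl (fun d x => d.modify x 0 (· + 1)) ((PySem.Dict.empty).modify k 0 (· + 1)) := by
      rw [PySem.Dict.counter_eq_foldl]
      rfl
    rw [← hc, pv_counts]
    have h1 : (1 : Int) - 1 = 0 := by norm_num
    rw [h1]
    have hzip : List.zip (k :: rest) rest = (k :: rest).zip ((k :: rest).drop 1) := by simp
    rw [hzip, pv_streak_iff_win (k :: rest) M]
    simp only [check_iat_alt]
    cases hA : (PySem.List.pyRange 0 (((k :: rest).length : Int) - (max M 1 + 1) + 1) 1).any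
        (fun i => pvAllEq (PySem.List.slice (k :: rest) (some i) (some (i + (max M 1 + 1))))) <;>
      simp

-- ===== VERDICT (by name: the statement is the Claim_ definition above) =====
theorem check_iat_spec : Claim_equal_check_iat := by
  intro ks M m _
  unfold Spec_check_iat
  exact pv_toplevel ks M m
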